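-- pv_equiv track=rewrite | github.com/Leonn190/Roll | Grid.py | _line_ok
-- ===== SOURCE A (Python) =====
-- def _line_ok(existing: set, new_cell):
--     if not existing:
--         return True
--     nc, nr = new_cell
--     if len(existing) == 1:
--         c0, r0 = next(iter(existing))
--         return nr == r0 or nc == c0
--     rows = {r for _, r in existing}
--     cols = {c for c, _ in existing}
--     if len(rows) == 1:
--         return nr == next(iter(rows))
--     if len(cols) == 1:
--         return nc == next(iter(cols))
--     return False
-- ===== SOURCE B (Python) =====
-- def _line_ok(existing: set, new_cell):
--     # The move is legal iff the whole configuration INCLUDING the new cell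
--     # is collinear: all cells in one row or all cells in one column.
--     cells = set(existing) | {new_cell}
--     rows = {r for _, r in cells}
--     cols = {c for c, _ in cells}
--     return len(rows) <= 1 or len(cols) <= 1
-- ===== Notes on version B (the rewrite author's own statement) =====
-- stated objective: simpler
-- what changed: Instead of case-splitting on the shape of the existing cells (empty / singleton / all-one-row / all-one-column) and testing the new cell against each case, B first adds the new cell to the set and then asks one uniform question: is the resulting configuration collinear (one row or one column)?
import Mathlib
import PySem

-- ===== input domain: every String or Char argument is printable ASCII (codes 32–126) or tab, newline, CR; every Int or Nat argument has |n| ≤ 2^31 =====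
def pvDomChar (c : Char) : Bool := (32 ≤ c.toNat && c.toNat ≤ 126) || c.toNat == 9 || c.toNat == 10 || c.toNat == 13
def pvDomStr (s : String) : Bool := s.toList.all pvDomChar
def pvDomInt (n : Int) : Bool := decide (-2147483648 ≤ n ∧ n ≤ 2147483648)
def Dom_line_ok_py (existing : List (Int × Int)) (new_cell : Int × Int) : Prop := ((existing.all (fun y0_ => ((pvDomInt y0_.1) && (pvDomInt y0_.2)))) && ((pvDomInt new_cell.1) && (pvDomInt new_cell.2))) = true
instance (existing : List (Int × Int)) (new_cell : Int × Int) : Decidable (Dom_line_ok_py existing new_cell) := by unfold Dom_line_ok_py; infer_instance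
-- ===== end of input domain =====

-- B drops A's case analysis on the shape of `existing` (empty / singleton /
-- one-row / one-column) and instead adds the new cell to the set and asks one
-- uniform question: is the whole configuration collinear? (objective: simpler).

-- ===== PORT A =====
-- `existing` is a Python set: the list holds its distinct elements (Pre_ below).
def line_ok_py (existing : List (Int × Int)) (new_cell : Int × Int) : Bool :=
  match existing with
  | [] => true                                   -- if not existing: return True
  | (c0, r0) :: _ =>
    let nc := new_cell.1
    let nr := new_cell.2
    if existing.length = 1 then
      -- next(iter(existing)) of a one-element set is its unique element
      (nr == r0 || nc == c0)
    else
      let rows : PySem.Set Int := PySem.Set.ofList (existing.map (fun p => p.2))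
      let cols : PySem.Set Int := PySem.Set.ofList (existing.map (fun p => p.1))
      if rows.length = 1 then
        nr == rows.headD 0                        -- next(iter(rows)): unique element
      else if cols.length = 1 then
        nc == cols.headD 0
      else
        false

-- ===== PORT B =====
-- cells = set(existing) | {new_cell}; the row/col comprehensions iterate a set
-- but only the resulting set LENGTHS are used, so the result is order-independent.
def line_ok_py_alt (existing : List (Int × Int)) (new_cell : Int × Int) : Bool :=
  let cells : PySem.Set (Int × Int) := PySem.Set.union (PySem.Set.ofList existing) [new_cell]
  let rows : PySem.Set Int := PySem.Set.ofList (cells.map (fun p => p.2))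
  let cols : PySem.Set Int := PySem.Set.ofList (cells.map (fun p => p.1))
  decide (rows.length ≤ 1) || decide (cols.length ≤ 1)

-- ===== PRECONDITION & SPEC =====
-- The Python argument is a set; its List model holds distinct elements, so Pre_
-- requires Nodup (with duplicates the list does not represent any Python input).
def Pre_line_ok_py (existing : List (Int × Int)) (new_cell : Int × Int) : Prop :=
  existing.Nodup
instance (existing : List (Int × Int)) (new_cell : Int × Int) : Decidable (Pre_line_ok_py existing new_cell) := by unfold Pre_line_ok_py; infer_instance

def pvWitness_line_ok_py : (List (Int × Int)) × (Int × Int) := ([(0, 0), (0, 1)], (0, 2))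

def Spec_line_ok_py (existing : List (Int × Int)) (new_cell : Int × Int) (out : Bool) : Prop := out = line_ok_py_alt existing new_cell
instance (existing : List (Int × Int)) (new_cell : Int × Int) (out : Bool) : Decidable (Spec_line_ok_py existing new_cell out) := by unfold Spec_line_ok_py; infer_instance

-- ===== CLAIM (what is proved, stated in full; the proofs are below) =====
def Claim_equal_line_ok_py : Prop := ∀ (existing : List (Int × Int)) (new_cell : Int × Int), Dom_line_ok_py existing new_cell → Pre_line_ok_py existing new_cell → Spec_line_ok_py existing new_cell (line_ok_py existing new_cell)

-- ===== LEMMAS AND PROOFS =====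

-- A nonempty set has ≤ 1 element iff every listed element equals the first.
theorem ofList_len_le_one_iff {α : Type} [BEq α] [LawfulBEq α] (x : α) (xs : List α) :
    (PySem.Set.ofList (x :: xs)).length ≤ 1 ↔ ∀ y ∈ xs, y = x := by
  rw [PySem.Set.ofList_cons, List.length_cons]
  have h0 : ((PySem.Set.ofList xs).discard x) = [] ↔ ∀ y ∈ xs, y = x := by
    rw [List.eq_nil_iff_forall_not_mem]
    constructor
    · intro h y hy
      by_contra hne
      exact h y ((PySem.Set.mem_discard _ _ _).mpr ⟨(PySem.Set.mem_ofList _ _).mpr hy, hne⟩)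
    · intro h y hy
      rw [PySem.Set.mem_discard _ _ _, PySem.Set.mem_ofList _ _] at hy
      exact hy.2 (h y hy.1)
  rw [← h0]
  constructor
  · intro h; rw [← List.length_eq_zero_iff]; omega
  · intro h; rw [h]; simp

-- same statement for "= 1" (A tests len(rows) == 1 on a nonempty set)
theorem ofList_len_eq_one_iff {α : Type} [BEq α] [LawfulBEq α] (x : α) (xs : List α) :
    ((PySem.Set.ofList (x :: xs)).length = 1) ↔ ∀ y ∈ xs, y = x := by
  rw [← ofList_len_le_one_iff]
  have hpos : 0 < (PySem.Set.ofList (x :: xs)).length := by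
    rw [PySem.Set.ofList_cons]; simp
  omega

-- the head of the dedup of a nonempty list is the first element
theorem ofList_head (x : Int) (xs : List Int) :
    (PySem.Set.ofList (x :: xs)).headD 0 = x := by
  rw [PySem.Set.ofList_cons]; rfl

-- "all images over the tail equal f e", transported along a membership description
theorem map_all_eq (f : Int × Int → Int) (e : Int × Int) (tl es : List (Int × Int))
    (w : Int × Int) (hmem : ∀ q, q ∈ e :: tl ↔ q ∈ e :: es ∨ q = w) :
    (∀ y ∈ tl.map f, y = f e) ↔ ((∀ p ∈ es, f p = f e) ∧ f w = f e) := by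
  constructor
  · intro h
    have h' : ∀ q ∈ e :: tl, f q = f e := by
      intro q hq
      rcases List.mem_cons.mp hq with rfl | hq'
      · rfl
      · exact h (f q) (List.mem_map.mpr ⟨q, hq', rfl⟩)
    exact ⟨fun p hp => h' p ((hmem p).mpr (Or.inl (List.mem_cons_of_mem _ hp))),
           h' w ((hmem w).mpr (Or.inr rfl))⟩
  · rintro ⟨h1, h2⟩ y hy
    obtain ⟨q, hq, rfl⟩ := List.mem_map.mp hy
    rcases (hmem q).mp (List.mem_cons_of_mem _ hq) with hq' | rfl
    · rcases List.mem_cons.mp hq' with rfl | hq''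
      · rfl
      · exact h1 q hq''
    · exact h2

-- B's test on the union, rewritten as a condition on existing and new_cell
theorem alt_char (e : Int × Int) (es : List (Int × Int)) (w : Int × Int) :
    line_ok_py_alt (e :: es) w =
      (decide ((∀ p ∈ es, p.2 = e.2) ∧ w.2 = e.2) ||
       decide ((∀ p ∈ es, p.1 = e.1) ∧ w.1 = e.1)) := by
  unfold line_ok_py_alt
  obtain ⟨tl, htl⟩ : ∃ tl, PySem.Set.union (PySem.Set.ofList (e :: es)) [w] = e :: tl := by
    rw [PySem.Set.ofList_cons]
    simp only [PySem.Set.union, PySem.Set.update, List.foldl_cons, List.foldl_nil,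
      PySem.Set.add]
    split
    · exact ⟨_, rfl⟩
    · exact ⟨_, rfl⟩
  have hmem : ∀ q, q ∈ e :: tl ↔ q ∈ e :: es ∨ q = w := by
    intro q
    rw [← htl, PySem.Set.mem_union _ _ _, PySem.Set.mem_ofList _ _]
    simp
  rw [htl]
  simp only [List.map_cons]
  rw [Bool.eq_iff_iff]
  simp only [Bool.or_eq_true, decide_eq_true_eq, ofList_len_le_one_iff]
  rw [map_all_eq _ _ _ _ _ hmem, map_all_eq _ _ _ _ _ hmem]

-- ===== VERDICT (by name: the statement is the Claim_ definition above) =====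
theorem line_ok_py_spec : Claim_equal_line_ok_py := by
  intro existing new_cell _ hpre
  unfold Spec_line_ok_py
  match existing with
  | [] =>
    unfold line_ok_py line_ok_py_alt
    rfl
  | (c0, r0) :: rest =>
    rw [alt_char]
    simp only [line_ok_py]
    match rest with
    | [] =>
      rw [Bool.eq_iff_iff]
      simp
    | q :: rs =>
      have hlen : ¬ (((c0, r0) :: q :: rs).length = 1) := by simp
      rw [if_neg hlen]
      simp only [List.map_cons]
      have hnotboth : ¬ ((∀ p ∈ q :: rs, p.2 = r0) ∧ (∀ p ∈ q :: rs, p.1 = c0)) := by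
        rintro ⟨h2, h1⟩
        have hq : q = (c0, r0) :=
          Prod.ext (h1 q List.mem_cons_self) (h2 q List.mem_cons_self)
        exact (List.nodup_cons.mp hpre).1 (by simp [hq])
      have hr : ((PySem.Set.ofList (r0 :: q.2 :: rs.map (fun p => p.2))).length = 1)
          ↔ ∀ p ∈ q :: rs, p.2 = r0 := by
        rw [ofList_len_eq_one_iff]
        constructor
        · intro h p hp
          rcases List.mem_cons.mp hp with rfl | hp'
          · exact h _ List.mem_cons_self
          · exact h _ (List.mem_cons_of_mem _ (List.mem_map.mpr ⟨p, hp', rfl⟩))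
        · intro h y hy
          rcases List.mem_cons.mp hy with rfl | hy'
          · exact h q List.mem_cons_self
          · obtain ⟨p, hp, rfl⟩ := List.mem_map.mp hy'
            exact h p (List.mem_cons_of_mem _ hp)
      have hc : ((PySem.Set.ofList (c0 :: q.1 :: rs.map (fun p => p.1))).length = 1)
          ↔ ∀ p ∈ q :: rs, p.1 = c0 := by
        rw [ofList_len_eq_one_iff]
        constructor
        · intro h p hp
          rcases List.mem_cons.mp hp with rfl | hp'
          · exact h _ List.mem_cons_self
          · exact h _ (List.mem_cons_of_mem _ (List.mem_map.mpr ⟨p, hp', rfl⟩))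
        · intro h y hy
          rcases List.mem_cons.mp hy with rfl | hy'
          · exact h q List.mem_cons_self
          · obtain ⟨p, hp, rfl⟩ := List.mem_map.mp hy'
            exact h p (List.mem_cons_of_mem _ hp)
      by_cases hR : ∀ p ∈ q :: rs, p.2 = r0
      · have hC : ¬ ∀ p ∈ q :: rs, p.1 = c0 := fun hC => hnotboth ⟨hR, hC⟩
        rw [if_pos (hr.mpr hR), ofList_head, Bool.eq_iff_iff]
        simp only [Bool.or_eq_true, decide_eq_true_eq, beq_iff_eq]
        constructor
        · intro h; exact Or.inl ⟨hR, h⟩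
        · rintro (⟨_, h⟩ | ⟨hC', _⟩)
          · exact h
          · exact absurd hC' hC
      · rw [if_neg (fun h => hR (hr.mp h))]
        by_cases hC : ∀ p ∈ q :: rs, p.1 = c0
        · rw [if_pos (hc.mpr hC), ofList_head, Bool.eq_iff_iff]
          simp only [Bool.or_eq_true, decide_eq_true_eq, beq_iff_eq]
          constructor
          · intro h; exact Or.inr ⟨hC, h⟩
          · rintro (⟨hR', _⟩ | ⟨_, h⟩)
            · exact absurd hR' hR
            · exact h
        · rw [if_neg (fun h => hC (hc.mp h)), Bool.eq_iff_iff]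
          simp only [Bool.false_eq_true, Bool.or_eq_true, decide_eq_true_eq, false_iff]
          rintro (⟨hR', _⟩ | ⟨hC', _⟩)
          · exact hR hR'
          · exact hC hC'
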